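-- pv_equiv track=rewrite | github.com/devbackend/oh-my-aliases | alias.py | find_alias
-- ===== SOURCE A (Python) =====
-- def find_alias(cmd, items):
--     if len(cmd) == 0 or len(items) == 0:
--         return None
--
--     if cmd in items:
--         return items[cmd]
--
--     sorted_items = dict(sorted(items.items(), reverse=True))
--
--     for full, alias in sorted_items.items():
--         if cmd.find(full) == 0:
--             return cmd.replace(full, alias)
--
--     return None
-- ===== SOURCE B (Python) =====
-- def find_alias(cmd, items):
--     if len(cmd) == 0:
--         return None
--     best = None
--     for full, alias in items.items():
--         if cmd.startswith(full) and (best is None or len(best[0]) < len(full)):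
--             best = (full, alias)
--     if best is None:
--         return None
--     return cmd.replace(best[0], best[1])
-- ===== Notes on version B (the rewrite author's own statement) =====
-- stated objective: faster
-- what changed: A sorts the whole dict descending on every call and scans for the first prefix-matching key; B makes a single unsorted pass keeping the longest prefix-matching key (among prefixes of cmd the lexicographic maximum is the longest), folding the exact-match case into the same pass.
import Mathlib
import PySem

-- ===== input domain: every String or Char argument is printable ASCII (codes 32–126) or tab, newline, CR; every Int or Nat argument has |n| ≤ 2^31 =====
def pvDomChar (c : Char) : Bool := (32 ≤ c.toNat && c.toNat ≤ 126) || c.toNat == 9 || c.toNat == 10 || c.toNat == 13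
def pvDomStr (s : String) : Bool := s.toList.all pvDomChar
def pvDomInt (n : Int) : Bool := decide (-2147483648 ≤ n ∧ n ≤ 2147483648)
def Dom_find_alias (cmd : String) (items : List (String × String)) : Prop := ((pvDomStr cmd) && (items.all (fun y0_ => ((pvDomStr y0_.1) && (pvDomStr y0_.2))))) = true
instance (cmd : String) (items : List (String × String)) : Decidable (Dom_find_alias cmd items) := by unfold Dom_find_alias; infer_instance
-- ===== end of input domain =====

-- B replaces A's sort-then-scan (O(n log n · L)) by a single pass tracking the longest
-- prefix-matching key (O(n · L)); equivalence of return values is proved under Pre_ (distinct keys).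

-- ===== PORT A =====
-- A's loop 'for full, alias in sorted_items.items(): if cmd.find(full) == 0: return …'
def a_scan (cmd : String) : List (String × String) → Option String
  | [] => none
  | (full, als) :: rest =>
      if PySem.Str.find cmd full = 0 then some (PySem.Str.replace cmd full als)
      else a_scan cmd rest

def find_alias (cmd : String) (items : List (String × String)) : Option String :=
  if PySem.Str.len cmd = 0 ∨ items.length = 0 then none
  else
    match (PySem.Dict.mk items).get? cmd with   -- 'if cmd in items: return items[cmd]'
    | some v => some v
    | none =>
        -- sorted_items = dict(sorted(items.items(), reverse=True))
        a_scan cmd (PySem.Dict.ofList (PySem.List.sorted2 items Prod.fst Prod.snd true)).items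

-- ===== PORT B =====
-- B's loop body: keep the prefix-matching pair with the longest key
def b_step (cmd : String) (best : Option (String × String)) (p : String × String) : Option (String × String) :=
  match best with
  | none => if PySem.Str.startswith cmd p.1 then some p else none
  | some b =>
      if PySem.Str.startswith cmd p.1 && decide (PySem.Str.len b.1 < PySem.Str.len p.1)
      then some p else some b

def find_alias_alt (cmd : String) (items : List (String × String)) : Option String :=
  if PySem.Str.len cmd = 0 then none
  else
    match items.foldl (b_step cmd) none with
    | none => none
    | some b => some (PySem.Str.replace cmd b.1 b.2)

-- ===== PRECONDITION & SPEC =====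
-- Pre_: the association list stands for a Python dict, whose keys are unique; every input
-- that actually reaches the Python function satisfies it (a dict cannot carry duplicate keys).
def Pre_find_alias (cmd : String) (items : List (String × String)) : Prop :=
  (items.map Prod.fst).Nodup
instance (cmd : String) (items : List (String × String)) : Decidable (Pre_find_alias cmd items) := by unfold Pre_find_alias; infer_instance

def pvWitness_find_alias : String × (List (String × String)) :=
  ("gs -a", [("g", "git"), ("gs", "git status")])

def Spec_find_alias (cmd : String) (items : List (String × String)) (out : Option String) : Prop := out = find_alias_alt cmd items
instance (cmd : String) (items : List (String × String)) (out : Option String) : Decidable (Spec_find_alias cmd items out) := by unfold Spec_find_alias; infer_instance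

-- ===== CLAIM (what is proved, stated in full; the proofs are below) =====
def Claim_equal_find_alias : Prop := ∀ (cmd : String) (items : List (String × String)), Dom_find_alias cmd items → Pre_find_alias cmd items → Spec_find_alias cmd items (find_alias cmd items)

-- ===== LEMMAS AND PROOFS =====

-- strict lexicographic order on pairs of strings (Python's tuple '<')
def LtP (x y : String × String) : Prop := x.1 < y.1 ∨ (x.1 = y.1 ∧ x.2 < y.2)

-- descending-adjacency relation of A's sorted list
def DescR (x y : String × String) : Prop := LtP y x ∨ y = x

theorem ltP_trans {x y z : String × String} (h1 : LtP x y) (h2 : LtP y z) : LtP x z := by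
  rcases h1 with h1 | ⟨e1, h1⟩ <;> rcases h2 with h2 | ⟨e2, h2⟩
  · exact Or.inl (lt_trans h1 h2)
  · exact Or.inl (e2 ▸ h1)
  · exact Or.inl (e1 ▸ h2)
  · exact Or.inr ⟨e1.trans e2, lt_trans h1 h2⟩

theorem ltP_total {x y : String × String} (h : ¬ LtP y x) : LtP x y ∨ x = y := by
  unfold LtP at *
  rcases lt_trichotomy x.1 y.1 with h1 | h1 | h1
  · exact Or.inl (Or.inl h1)
  · rcases lt_trichotomy x.2 y.2 with h2 | h2 | h2
    · exact Or.inl (Or.inr ⟨h1, h2⟩)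
    · exact Or.inr (Prod.ext h1 h2)
    · exact absurd (Or.inr ⟨h1.symm, h2⟩) h
  · exact absurd (Or.inl h1) h

theorem lt_bool_iff (x y : String × String) :
    (decide (x.1 < y.1) || (!decide (y.1 < x.1) && decide (x.2 < y.2))) = true ↔ LtP x y := by
  unfold LtP
  simp only [Bool.or_eq_true, Bool.and_eq_true, Bool.not_eq_true', decide_eq_true_eq,
    decide_eq_false_iff_not]
  constructor
  · rintro (h | ⟨h1, h2⟩)
    · exact Or.inl h
    · rcases lt_trichotomy x.1 y.1 with h3 | h3 | h3
      · exact Or.inl h3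
      · exact Or.inr ⟨h3, h2⟩
      · exact absurd h3 h1
  · rintro (h | ⟨h1, h2⟩)
    · exact Or.inl h
    · exact Or.inr ⟨by rw [h1]; exact lt_irrefl _, h2⟩

theorem insertBy_cons {α : Type} (before : α → α → Bool) (x y : α) (t : List α) :
    PySem.List.insertBy before x (y :: t) =
      if before x y = true then x :: y :: t else y :: PySem.List.insertBy before x t := by
  rfl

theorem insertBy_pairwise_desc (x : String × String) (ys : List (String × String))
    (h : ys.Pairwise DescR) :
    (PySem.List.insertBy
      (fun a b => decide (b.1 < a.1) || (!decide (a.1 < b.1) && decide (b.2 < a.2))) x ys).Pairwise DescR := by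
  induction ys with
  | nil => simp [PySem.List.insertBy]
  | cons y t ih =>
    rw [List.pairwise_cons] at h
    obtain ⟨hy, ht⟩ := h
    by_cases hb : (decide (y.1 < x.1) || (!decide (x.1 < y.1) && decide (y.2 < x.2))) = true
    · rw [insertBy_cons, if_pos hb]
      have hyx : LtP y x := (lt_bool_iff y x).mp hb
      refine List.pairwise_cons.mpr ⟨?_, List.pairwise_cons.mpr ⟨hy, ht⟩⟩
      intro z hz
      rcases List.mem_cons.mp hz with rfl | hz
      · exact Or.inl hyx
      · rcases hy z hz with h | rfl
        · exact Or.inl (ltP_trans h hyx)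
        · exact Or.inl hyx
    · rw [insertBy_cons, if_neg hb]
      refine List.pairwise_cons.mpr ⟨?_, ih ht⟩
      intro z hz
      rcases (PySem.List.mem_insertBy _ x z t).mp hz with rfl | hz
      · have : ¬ LtP y z := fun hc => hb ((lt_bool_iff y z).mpr hc)
        rcases ltP_total this with h | h
        · exact Or.inl h
        · exact Or.inr h
      · exact hy z hz

theorem sorted2_pairwise_desc (items : List (String × String)) :
    (PySem.List.sorted2 items Prod.fst Prod.snd true).Pairwise DescR := by
  have key : ∀ (l acc : List (String × String)), acc.Pairwise DescR →
      (l.foldl (fun acc x => PySem.List.insertBy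
        (fun a b => decide (b.1 < a.1) || (!decide (a.1 < b.1) && decide (b.2 < a.2))) x acc)
        acc).Pairwise DescR := by
    intro l
    induction l with
    | nil => intro acc h; simpa using h
    | cons p t ih => intro acc h; exact ih _ (insertBy_pairwise_desc p acc h)
  simpa [PySem.List.sorted2] using key items [] (by simp)

-- the first prefix hit of a descending-sorted list is lexicographically maximal among hits
theorem find?_desc_max {q : String × String → Bool} {S : List (String × String)}
    {b : String × String} (hpw : S.Pairwise DescR) (h : S.find? q = some b) :
    ∀ p ∈ S, q p = true → LtP p b ∨ p = b := by
  induction S with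
  | nil => simp at h
  | cons y t ih =>
    rw [List.pairwise_cons] at hpw
    obtain ⟨hy, ht⟩ := hpw
    by_cases hq : q y = true
    · rw [List.find?_cons_of_pos (h := hq)] at h
      obtain rfl : y = b := by injection h
      intro p hp _
      rcases List.mem_cons.mp hp with rfl | hp
      · exact Or.inr rfl
      · exact hy p hp
    · rw [List.find?_cons_of_neg (h := hq)] at h
      intro p hp hqp
      rcases List.mem_cons.mp hp with rfl | hp
      · exact absurd hqp hq
      · exact ih ht h p hp hqp

theorem find_go_lb (sub : List Char) : ∀ (l : List Char) (k : Nat),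
    PySem.Chars.find.go sub l k = -1 ∨ (k : Int) ≤ PySem.Chars.find.go sub l k := by
  intro l
  induction l with
  | nil =>
    intro k
    by_cases he : sub.isEmpty = true <;> simp [PySem.Chars.find.go, he]
  | cons c t ih =>
    intro k
    by_cases hp : sub.isPrefixOf (c :: t) = true
    · simp [PySem.Chars.find.go, hp]
    · have := ih (k + 1)
      rw [show PySem.Chars.find.go sub (c :: t) k = PySem.Chars.find.go sub t (k + 1) from by
        simp [PySem.Chars.find.go, hp]]
      rcases this with h | h
      · exact Or.inl h
      · right; omega

theorem find_eq_zero_iff (cmd full : String) (h0 : cmd.toList ≠ []) :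
    PySem.Str.find cmd full = 0 ↔ PySem.Str.startswith cmd full = true := by
  obtain ⟨c, t, hct⟩ : ∃ c t, cmd.toList = c :: t := by
    cases h : cmd.toList with
    | nil => exact absurd h h0
    | cons c t => exact ⟨c, t, rfl⟩
  rw [PySem.Str.find, PySem.Chars.find, PySem.Str.startswith, PySem.Chars.startswith, hct]
  by_cases hp : full.toList.isPrefixOf (c :: t) = true
  · simp [PySem.Chars.find.go, hp]
  · rw [show PySem.Chars.find.go full.toList (c :: t) 0 = PySem.Chars.find.go full.toList t 1 from by
      simp [PySem.Chars.find.go, hp]]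
    have hne : PySem.Chars.find.go full.toList t 1 ≠ 0 := by
      rcases find_go_lb full.toList t 1 with h | h <;> omega
    constructor
    · intro hz; exact absurd hz hne
    · intro hs; exact absurd hs hp

theorem replace_go_nil (old new acc : List Char) (fuel : Nat) :
    PySem.Chars.replace.go old new fuel [] acc = acc.reverse := by
  cases fuel <;> simp [PySem.Chars.replace.go]

theorem replace_self (s v : String) (h0 : s.toList ≠ []) :
    PySem.Str.replace s s v = v := by
  obtain ⟨c, t, hct⟩ : ∃ c t, s.toList = c :: t := by
    cases h : s.toList with
    | nil => exact absurd h h0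
    | cons c t => exact ⟨c, t, rfl⟩
  rw [PySem.Str.replace, PySem.Chars.replace, hct]
  have hpre : (c :: t).isPrefixOf (c :: t) = true := by
    simp [List.isPrefixOf_iff_prefix]
  rw [show (c :: t).isEmpty = false from rfl]
  simp only [Bool.false_eq_true, if_false]
  rw [show (c :: t).length = t.length + 1 from rfl]
  rw [show PySem.Chars.replace.go (c :: t) v.toList (t.length + 1) (c :: t) []
      = PySem.Chars.replace.go (c :: t) v.toList t.length
          (List.drop (c :: t).length (c :: t)) (v.toList.reverse ++ []) from by
    simp [PySem.Chars.replace.go, hpre]]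
  rw [List.drop_length, replace_go_nil]
  simp [String.ofList_toList]

theorem a_scan_eq_find? (cmd : String) (h0 : cmd.toList ≠ []) (l : List (String × String)) :
    a_scan cmd l = (l.find? (fun p => PySem.Str.startswith cmd p.1)).map
      (fun p => PySem.Str.replace cmd p.1 p.2) := by
  induction l with
  | nil => simp [a_scan]
  | cons p t ih =>
    obtain ⟨f, al⟩ := p
    by_cases hs : PySem.Str.startswith cmd f = true
    · have hz := (find_eq_zero_iff cmd f h0).mpr hs
      simp only [a_scan, if_pos hz, List.find?_cons, hs, cond_true, Option.map_some]
    · have hs' : PySem.Str.startswith cmd f = false := by simpa using hs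
      have hnz : ¬ PySem.Str.find cmd f = 0 := fun hz => hs ((find_eq_zero_iff cmd f h0).mp hz)
      simp only [a_scan, if_neg hnz, List.find?_cons, hs', cond_false]
      exact ih

theorem bfold_some (cmd : String) : ∀ (l : List (String × String)) (a b : String × String),
    l.foldl (b_step cmd) (some a) = some b →
    (b = a ∨ (b ∈ l ∧ PySem.Str.startswith cmd b.1 = true)) ∧
    (∀ p ∈ l, PySem.Str.startswith cmd p.1 = true → p.1.toList.length ≤ b.1.toList.length) ∧
    a.1.toList.length ≤ b.1.toList.length := by
  intro l
  induction l with
  | nil =>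
    intro a b h
    simp only [List.foldl_nil, Option.some.injEq] at h
    subst h
    exact ⟨Or.inl rfl, by simp, le_refl _⟩
  | cons p t ih =>
    intro a b h
    simp only [List.foldl_cons] at h
    by_cases hc : (PySem.Str.startswith cmd p.1 && decide (PySem.Str.len a.1 < PySem.Str.len p.1)) = true
    · rw [show b_step cmd (some a) p = some p from by simp only [b_step, if_pos hc]] at h
      obtain ⟨h1, h2, h3⟩ := ih p b h
      rw [Bool.and_eq_true, decide_eq_true_eq] at hc
      have hlen : a.1.toList.length < p.1.toList.length := by
        have := hc.2
        simp only [PySem.Str.len] at this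
        exact_mod_cast this
      refine ⟨?_, ?_, ?_⟩
      · rcases h1 with rfl | ⟨hm, hp⟩
        · exact Or.inr ⟨by simp, hc.1⟩
        · exact Or.inr ⟨List.mem_cons_of_mem _ hm, hp⟩
      · intro q hq hqs
        rcases List.mem_cons.mp hq with rfl | hq
        · exact h3
        · exact h2 q hq hqs
      · exact le_of_lt (lt_of_lt_of_le hlen h3)
    · rw [show b_step cmd (some a) p = some a from by simp only [b_step, if_neg hc]] at h
      obtain ⟨h1, h2, h3⟩ := ih a b h
      refine ⟨?_, ?_, h3⟩
      · rcases h1 with rfl | ⟨hm, hp⟩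
        · exact Or.inl rfl
        · exact Or.inr ⟨List.mem_cons_of_mem _ hm, hp⟩
      · intro q hq hqs
        rcases List.mem_cons.mp hq with rfl | hq
        · have hle : q.1.toList.length ≤ a.1.toList.length := by
            by_contra hlt
            rw [not_le] at hlt
            refine hc ?_
            simp only [Bool.and_eq_true, decide_eq_true_eq]
            refine ⟨hqs, ?_⟩
            simp only [PySem.Str.len]
            exact_mod_cast hlt
          exact le_trans hle h3
        · exact h2 q hq hqs

theorem bfold_some_ne_none (cmd : String) : ∀ (l : List (String × String)) (a : String × String),
    l.foldl (b_step cmd) (some a) ≠ none := by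
  intro l
  induction l with
  | nil => intro a h; simp at h
  | cons p t ih =>
    intro a
    simp only [List.foldl_cons]
    by_cases hc : (PySem.Str.startswith cmd p.1 && decide (PySem.Str.len a.1 < PySem.Str.len p.1)) = true
    · rw [show b_step cmd (some a) p = some p from by simp only [b_step, if_pos hc]]
      exact ih p
    · rw [show b_step cmd (some a) p = some a from by simp only [b_step, if_neg hc]]
      exact ih a

theorem bfold_none_iff (cmd : String) : ∀ (l : List (String × String)),
    l.foldl (b_step cmd) none = none ↔ ∀ p ∈ l, ¬ PySem.Str.startswith cmd p.1 = true := by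
  intro l
  induction l with
  | nil => simp
  | cons p t ih =>
    simp only [List.foldl_cons]
    by_cases hs : PySem.Str.startswith cmd p.1 = true
    · rw [show b_step cmd none p = some p from by simp only [b_step, if_pos hs]]
      constructor
      · intro h; exact absurd h (bfold_some_ne_none cmd t p)
      · intro h; exact absurd hs (h p (by simp))
    · rw [show b_step cmd none p = none from by simp only [b_step, if_neg hs]]
      rw [ih]
      constructor
      · intro h q hq hqs
        rcases List.mem_cons.mp hq with rfl | hq
        · exact hs hqs
        · exact h q hq hqs
      · intro h q hq hqs
        exact h q (List.mem_cons_of_mem _ hq) hqs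

theorem bfold_char (cmd : String) (l : List (String × String)) (b : String × String)
    (h : l.foldl (b_step cmd) none = some b) :
    b ∈ l ∧ PySem.Str.startswith cmd b.1 = true ∧
    ∀ p ∈ l, PySem.Str.startswith cmd p.1 = true → p.1.toList.length ≤ b.1.toList.length := by
  induction l with
  | nil => simp at h
  | cons p t ih =>
    simp only [List.foldl_cons] at h
    by_cases hs : PySem.Str.startswith cmd p.1 = true
    · rw [show b_step cmd none p = some p from by simp only [b_step, if_pos hs]] at h
      obtain ⟨h1, h2, h3⟩ := bfold_some cmd t p b h
      refine ⟨?_, ?_, ?_⟩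
      · rcases h1 with rfl | ⟨hm, _⟩
        · simp
        · exact List.mem_cons_of_mem _ hm
      · rcases h1 with rfl | ⟨_, hp⟩
        · exact hs
        · exact hp
      · intro q hq hqs
        rcases List.mem_cons.mp hq with rfl | hq
        · exact h3
        · exact h2 q hq hqs
    · rw [show b_step cmd none p = none from by simp only [b_step, if_neg hs]] at h
      obtain ⟨h1, h2, h3⟩ := ih h
      refine ⟨List.mem_cons_of_mem _ h1, h2, ?_⟩
      intro q hq hqs
      rcases List.mem_cons.mp hq with rfl | hq
      · exact absurd hqs hs
      · exact h3 q hq hqs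

theorem items_ofList_of_nodup (l : List (String × String)) (h : (l.map Prod.fst).Nodup) :
    (PySem.Dict.ofList l).items = l := by
  have h2 : ∀ p ∈ l, (PySem.Dict.empty : PySem.Dict String String).contains p.1 = false :=
    fun p _ => by simp [PySem.Dict.contains_empty]
  have := PySem.Dict.items_foldl_insert_fresh l Prod.fst Prod.snd PySem.Dict.empty h2 h
  simpa [PySem.Dict.ofList, PySem.Dict.update] using this

theorem lex_append_cons (a : List Char) (c : Char) (cs : List Char) :
    List.Lex (· < ·) a (a ++ c :: cs) := by
  induction a with
  | nil => exact List.Lex.nil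
  | cons x xs ih => exact List.Lex.cons ih

theorem str_lt_of_proper_prefix (a b : String) (hp : a.toList <+: b.toList)
    (hl : a.toList.length < b.toList.length) : a < b := by
  obtain ⟨r, hr⟩ := hp
  rw [String.lt_iff_toList_lt]
  cases r with
  | nil => rw [← hr] at hl; simp at hl
  | cons c cs =>
    have : List.Lex (· < ·) a.toList b.toList := hr ▸ lex_append_cons a.toList c cs
    rw [← List.lt_iff_lex_lt] at this
    exact this

theorem startswith_prefix_iff (cmd k : String) :
    PySem.Str.startswith cmd k = true ↔ k.toList <+: cmd.toList := by
  rw [PySem.Str.startswith]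
  exact PySem.Chars.startswith_iff _ _

-- two prefix-matching pairs, one lex-maximal and one length-maximal, coincide (distinct keys)
theorem argmax_unique (cmd : String) (items : List (String × String))
    (hpre : (items.map Prod.fst).Nodup)
    (bA bB : String × String) (hAmem : bA ∈ items) (hBmem : bB ∈ items)
    (hApre : PySem.Str.startswith cmd bA.1 = true) (hBpre : PySem.Str.startswith cmd bB.1 = true)
    (hlex : LtP bB bA ∨ bB = bA)
    (hlen : bA.1.toList.length ≤ bB.1.toList.length) : bA = bB := by
  rcases hlex with hlex | rfl
  · have hpA := (startswith_prefix_iff cmd bA.1).mp hApre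
    have hpB := (startswith_prefix_iff cmd bB.1).mp hBpre
    have hAB : bA.1.toList <+: bB.1.toList := List.prefix_of_prefix_length_le hpA hpB hlen
    by_cases heq : bA.1 = bB.1
    · exact List.inj_on_of_nodup_map hpre hAmem hBmem heq
    · exfalso
      have hlt : bA.1 < bB.1 := by
        apply str_lt_of_proper_prefix _ _ hAB
        rcases lt_or_eq_of_le hlen with h | h
        · exact h
        · exfalso
          apply heq
          have h2 := List.IsPrefix.eq_of_length hAB h
          calc bA.1 = String.ofList bA.1.toList := String.ofList_toList.symm
            _ = String.ofList bB.1.toList := by rw [h2]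
            _ = bB.1 := String.ofList_toList
      rcases hlex with h | ⟨e, _⟩
      · exact lt_asymm h hlt
      · exact heq e.symm
  · rfl

-- ===== VERDICT (by name: the statement is the Claim_ definition above) =====
theorem find_alias_spec : Claim_equal_find_alias := by
  intro cmd items _hdom hpre
  unfold Spec_find_alias
  by_cases h0 : cmd.toList = []
  · simp [find_alias, find_alias_alt, PySem.Str.len, h0]
  · have hlen0 : ¬ PySem.Str.len cmd = 0 := by
      simp only [PySem.Str.len]
      intro h
      exact h0 (List.length_eq_zero_iff.mp (by exact_mod_cast h))
    by_cases hnil : items = []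
    · subst hnil
      simp [find_alias, find_alias_alt]
    · have hlitems : ¬ items.length = 0 := by
        simpa [List.length_eq_zero_iff] using hnil
      rw [find_alias, find_alias_alt, if_neg (by tauto), if_neg hlen0]
      cases hg : (PySem.Dict.mk items).get? cmd with
      | some v =>
        have hmem : (cmd, v) ∈ items :=
          PySem.Dict.mem_items_of_get?_eq_some (PySem.Dict.mk items) hg
        have hpredcv : PySem.Str.startswith cmd cmd = true :=
          (startswith_prefix_iff cmd cmd).mpr (List.prefix_refl _)
        cases hf : items.foldl (b_step cmd) none with
        | none => exact absurd hpredcv ((bfold_none_iff cmd items).mp hf (cmd, v) hmem)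
        | some bB =>
          obtain ⟨hBmem, hBpre, hBmax⟩ := bfold_char cmd items bB hf
          have hble : bB.1.toList.length ≤ cmd.toList.length :=
            ((startswith_prefix_iff _ _).mp hBpre).length_le
          have hgecmd : cmd.toList.length ≤ bB.1.toList.length := hBmax (cmd, v) hmem hpredcv
          have hkeys : bB.1 = cmd := by
            have h2 := List.IsPrefix.eq_of_length ((startswith_prefix_iff _ _).mp hBpre)
              (le_antisymm hble hgecmd)
            calc bB.1 = String.ofList bB.1.toList := String.ofList_toList.symm
              _ = String.ofList cmd.toList := by rw [h2]
              _ = cmd := String.ofList_toList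
          have hbb : bB = (cmd, v) :=
            List.inj_on_of_nodup_map hpre hBmem hmem (by simpa using hkeys)
          rw [hbb]
          simp [replace_self cmd v h0]
      | none =>
        have hperm : (PySem.List.sorted2 items Prod.fst Prod.snd true).Perm items :=
          PySem.List.sorted2_perm items Prod.fst Prod.snd true
        have hnodupS : ((PySem.List.sorted2 items Prod.fst Prod.snd true).map Prod.fst).Nodup :=
          ((hperm.map Prod.fst).nodup_iff).mpr hpre
        rw [items_ofList_of_nodup _ hnodupS, a_scan_eq_find? cmd h0]
        cases hfA : (PySem.List.sorted2 items Prod.fst Prod.snd true).find?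
            (fun p => PySem.Str.startswith cmd p.1) with
        | none =>
          have hno : ∀ p ∈ items, ¬ PySem.Str.startswith cmd p.1 = true := by
            intro p hp
            exact List.find?_eq_none.mp hfA p (hperm.mem_iff.mpr hp)
          rw [(bfold_none_iff cmd items).mpr hno]
          rfl
        | some bA =>
          have hAmem : bA ∈ items := hperm.subset (List.mem_of_find?_eq_some hfA)
          have hApre : PySem.Str.startswith cmd bA.1 = true :=
            List.find?_some (p := fun p : String × String => PySem.Str.startswith cmd p.1) hfA
          have hmax := find?_desc_max (sorted2_pairwise_desc items) hfA
          cases hfB : items.foldl (b_step cmd) none with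
          | none => exact absurd hApre ((bfold_none_iff cmd items).mp hfB bA hAmem)
          | some bB =>
            obtain ⟨hBmem, hBpre, hBmax⟩ := bfold_char cmd items bB hfB
            have heq : bA = bB :=
              argmax_unique cmd items hpre bA bB hAmem hBmem hApre hBpre
                (hmax bB (hperm.mem_iff.mpr hBmem) hBpre) (hBmax bA hAmem hApre)
            rw [heq]
            rfl
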